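-- pv_equiv track=rewrite | github.com/aucho/CosyVoice | cosyvoice/utils/frontend_utils.py | find_english_word_boundary
-- ===== SOURCE A (Python) =====
-- def find_english_word_boundary(text: str, start_pos: int, end_pos: int) -> int:
--     """
--     在指定范围内找到最佳的英文单词边界位置
--     返回最接近end_pos但不截断单词的位置
--     """
--     # 首先尝试在空格、标点符号等明显分隔符处分割
--     for i in range(end_pos, start_pos, -1):
--         if text[i] in [' ', '\t', '\n', '.', ',', ';', ':', '!', '?', '-', '_']:
--             return i + 1
--
--     # 如果没有找到明显分隔符，尝试在单词边界分割
--     # 寻找字母到非字母的转换点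
--     for i in range(end_pos, start_pos, -1):
--         if i > 0 and i < len(text) - 1:
--             # 当前字符是字母，下一个字符不是字母
--             if text[i].isalpha() and not text[i + 1].isalpha():
--                 return i + 1
--             # 当前字符不是字母，下一个字符是字母
--             elif not text[i].isalpha() and text[i + 1].isalpha():
--                 return i + 1
--
--     # 如果都找不到合适的边界，返回原始位置
--     return end_pos
-- ===== SOURCE B (Python) =====
-- def find_english_word_boundary(text: str, start_pos: int, end_pos: int) -> int:
--     seps = (' ', '\t', '\n', '.', ',', ';', ':', '!', '?', '-', '_')
--     n = len(text)
--     boundary = None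
--     for i in range(end_pos, start_pos, -1):
--         ch = text[i]
--         if ch in seps:
--             return i + 1
--         if boundary is None and 0 < i < n - 1 and ch.isalpha() != text[i + 1].isalpha():
--             boundary = i
--     return boundary + 1 if boundary is not None else end_pos
-- ===== Notes on version B (the rewrite author's own statement) =====
-- stated objective: simpler
-- what changed: A's two full backward scans (separators first, then alpha/non-alpha transitions) are merged into one backward pass that returns immediately at a separator and records the first transition as a fallback candidate.
import Mathlib
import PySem

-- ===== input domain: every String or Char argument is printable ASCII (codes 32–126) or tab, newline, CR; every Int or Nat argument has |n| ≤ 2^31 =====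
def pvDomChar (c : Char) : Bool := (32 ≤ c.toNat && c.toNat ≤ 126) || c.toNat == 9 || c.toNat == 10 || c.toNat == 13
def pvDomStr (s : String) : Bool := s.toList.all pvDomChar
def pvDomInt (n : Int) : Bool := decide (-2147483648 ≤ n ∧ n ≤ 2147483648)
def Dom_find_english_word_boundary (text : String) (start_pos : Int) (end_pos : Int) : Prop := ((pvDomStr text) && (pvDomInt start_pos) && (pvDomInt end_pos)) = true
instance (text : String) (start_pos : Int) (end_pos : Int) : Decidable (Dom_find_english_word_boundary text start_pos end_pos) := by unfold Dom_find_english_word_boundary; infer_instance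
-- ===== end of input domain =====

-- B merges A's two backward scans into one pass that returns at a separator and keeps
-- the first word-boundary transition as a fallback (simpler; return value unchanged).

-- ===== PORT A =====
def pvSeps : List Char := [' ', '\t', '\n', '.', ',', ';', ':', '!', '?', '-', '_']

-- first loop of A: 'for i in range(end_pos, start_pos, -1)' as a countdown with fuel = number of
-- iterations; some v = early return (0 on the unreachable IndexError), none = fell through
def pvALoop1 (cs : List Char) : Nat → Int → Option Int
  | 0, _ => none
  | fuel + 1, i =>
    match PySem.List.pyGet? cs i with
    | none => some 0        -- Python raises IndexError here; excluded by Pre_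
    | some c => if c ∈ pvSeps then some (i + 1) else pvALoop1 cs fuel (i - 1)

-- second loop of A: the same countdown, scanning for an alpha/non-alpha transition
def pvALoop2 (cs : List Char) (n : Int) : Nat → Int → Option Int
  | 0, _ => none
  | fuel + 1, i =>
    if 0 < i ∧ i < n - 1 then
      match PySem.List.pyGet? cs i, PySem.List.pyGet? cs (i + 1) with
      | some c, some d =>
        if PySem.Chars.isalpha c && !(PySem.Chars.isalpha d) then some (i + 1)
        else if !(PySem.Chars.isalpha c) && PySem.Chars.isalpha d then some (i + 1)
        else pvALoop2 cs n fuel (i - 1)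
      | _, _ => pvALoop2 cs n fuel (i - 1)    -- unreachable: the guard makes both indices valid
    else pvALoop2 cs n fuel (i - 1)

def find_english_word_boundary (text : String) (start_pos : Int) (end_pos : Int) : Int :=
  let cs := text.toList
  let fuel := (end_pos - start_pos).toNat
  match pvALoop1 cs fuel end_pos with
  | some v => v
  | none =>
    match pvALoop2 cs (cs.length : Int) fuel end_pos with
    | some v => v
    | none => end_pos

-- ===== PORT B =====
-- single backward countdown; boundary = the recorded fallback transition (None until first found)
def pvBLoop (cs : List Char) (n e : Int) : Nat → Int → Option Int → Int
  | 0, _, boundary => match boundary with | some b => b + 1 | none => e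
  | fuel + 1, i, boundary =>
    match PySem.List.pyGet? cs i with
    | none => 0             -- Python raises IndexError here; excluded by Pre_
    | some c =>
      if c ∈ pvSeps then i + 1
      else
        pvBLoop cs n e fuel (i - 1)
          (if boundary = none ∧ 0 < i ∧ i < n - 1 then
            match PySem.List.pyGet? cs (i + 1) with
            | some d => if PySem.Chars.isalpha c != PySem.Chars.isalpha d then some i else boundary
            | none => boundary
          else boundary)

def find_english_word_boundary_alt (text : String) (start_pos : Int) (end_pos : Int) : Int :=
  let cs := text.toList
  pvBLoop cs (cs.length : Int) end_pos (end_pos - start_pos).toNat end_pos none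

-- ===== PRECONDITION & SPEC =====
-- Pre_ = exactly the inputs where A returns (no IndexError): the scanned range is empty, or its
-- indices stay in Python's valid (wrap-around) index range, or a separator is met before the
-- first invalid index.
def Pre_find_english_word_boundary (text : String) (start_pos : Int) (end_pos : Int) : Prop :=
  end_pos ≤ start_pos ∨
    ((-(text.toList.length : Int) ≤ end_pos ∧ end_pos < (text.toList.length : Int)) ∧
      (-(text.toList.length : Int) ≤ start_pos + 1 ∨
        ∃ i ∈ PySem.List.pyRange end_pos (-(text.toList.length : Int) - 1) (-1),
          ∃ c ∈ [' ', '\t', '\n', '.', ',', ';', ':', '!', '?', '-', '_'],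
            PySem.List.pyGet? text.toList i = some c))
instance (text : String) (start_pos : Int) (end_pos : Int) : Decidable (Pre_find_english_word_boundary text start_pos end_pos) := by unfold Pre_find_english_word_boundary; infer_instance

def pvWitness_find_english_word_boundary : String × Int × Int := ("hello world", 0, 9)

def Spec_find_english_word_boundary (text : String) (start_pos : Int) (end_pos : Int) (out : Int) : Prop := out = find_english_word_boundary_alt text start_pos end_pos
instance (text : String) (start_pos : Int) (end_pos : Int) (out : Int) : Decidable (Spec_find_english_word_boundary text start_pos end_pos out) := by unfold Spec_find_english_word_boundary; infer_instance

-- ===== CLAIM (what is proved, stated in full; the proofs are below) =====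
def Claim_equal_find_english_word_boundary : Prop := ∀ (text : String) (start_pos : Int) (end_pos : Int), Dom_find_english_word_boundary text start_pos end_pos → Pre_find_english_word_boundary text start_pos end_pos → Spec_find_english_word_boundary text start_pos end_pos (find_english_word_boundary text start_pos end_pos)

-- ===== LEMMAS AND PROOFS =====

-- loop invariant: B's single pass computes A's two-pass result, with `boundary` standing for
-- the pending fallback
lemma pvBLoop_invariant (cs : List Char) (n e : Int) :
    ∀ (fuel : Nat) (i : Int) (boundary : Option Int),
      pvBLoop cs n e fuel i boundary =
        match pvALoop1 cs fuel i with
        | some v => v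
        | none =>
          match boundary with
          | some b => b + 1
          | none => (match pvALoop2 cs n fuel i with | some v => v | none => e) := by
  intro fuel
  induction fuel with
  | zero => intro i boundary; cases boundary <;> simp [pvBLoop, pvALoop1, pvALoop2]
  | succ fuel ih =>
    intro i boundary
    rcases h : PySem.List.pyGet? cs i with _ | c
    · simp [pvBLoop, pvALoop1, h]
    · by_cases hsep : c ∈ pvSeps
      · simp [pvBLoop, pvALoop1, h, hsep]
      · rw [show pvBLoop cs n e (fuel + 1) i boundary = pvBLoop cs n e fuel (i - 1)
              (if boundary = none ∧ 0 < i ∧ i < n - 1 then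
                match PySem.List.pyGet? cs (i + 1) with
                | some d => if PySem.Chars.isalpha c != PySem.Chars.isalpha d then some i else boundary
                | none => boundary
              else boundary) from by simp [pvBLoop, h, hsep],
            show pvALoop1 cs (fuel + 1) i = pvALoop1 cs fuel (i - 1) from by simp [pvALoop1, h, hsep],
            ih]
        rcases h1 : pvALoop1 cs fuel (i - 1) with _ | v
        · cases boundary with
          | some b => simp
          | none =>
            by_cases hg : 0 < i ∧ i < n - 1
            · rcases h2 : PySem.List.pyGet? cs (i + 1) with _ | d
              · simp [pvALoop2, hg, h, h2]
              · by_cases ht : PySem.Chars.isalpha c != PySem.Chars.isalpha d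
                · have : (PySem.Chars.isalpha c && !(PySem.Chars.isalpha d)) = true ∨
                         (!(PySem.Chars.isalpha c) && PySem.Chars.isalpha d) = true := by
                    revert ht
                    cases PySem.Chars.isalpha c <;> cases PySem.Chars.isalpha d <;> simp
                  rcases this with hb | hb <;> simp [pvALoop2, hg, h, h2, ht, hb]
                · have heq : PySem.Chars.isalpha c = PySem.Chars.isalpha d := by
                    revert ht
                    cases PySem.Chars.isalpha c <;> cases PySem.Chars.isalpha d <;> simp
                  simp [pvALoop2, hg, h, h2, heq]
            · simp [pvALoop2, hg]
        · cases boundary <;> simp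

-- ===== VERDICT (by name: the statement is the Claim_ definition above) =====
theorem find_english_word_boundary_spec : Claim_equal_find_english_word_boundary := by
  intro text start_pos end_pos _ _
  unfold Spec_find_english_word_boundary find_english_word_boundary find_english_word_boundary_alt
  rw [pvBLoop_invariant]
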